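-- pv_equiv track=rewrite | github.com/lalitkarthik/Game-of-Life | Game of Life.py | alive_neighbours
-- ===== SOURCE A (Python) =====
-- def alive_neighbours(cell,grid):
--     directions=[(1, 0), (1, -1), (0, -1), (-1, 0), (-1, 1), (0, 1)]
--     count=0
--     for direction in directions:
--         coord=tuple(x + y for x, y in zip(cell, direction))
--         for row in grid:
--             for center in row:
--                 if center[0] == coord:
--                     if center[1]==1:
--                         count=count+1
--
--     return count
-- ===== SOURCE B (Python) =====
-- def alive_neighbours(cell, grid):
--     # Build once an index: coordinate -> number of alive cells there,
--     # then answer by 6 O(1) lookups instead of scanning the grid per direction.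
--     alive = {}
--     for row in grid:
--         for coord, state in row:
--             if state == 1:
--                 alive[coord] = alive.get(coord, 0) + 1
--     x, y = cell
--     return sum(alive.get((x + dx, y + dy), 0)
--                for dx, dy in ((1, 0), (1, -1), (0, -1), (-1, 0), (-1, 1), (0, 1)))
-- ===== Notes on version B (the rewrite author's own statement) =====
-- stated objective: faster
-- what changed: B builds a hash index (coordinate -> alive-cell count) in one pass over the grid and then answers with six O(1) dictionary lookups, so no grid scan depends on the directions; A instead scans the whole grid once per direction.
import Mathlib
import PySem

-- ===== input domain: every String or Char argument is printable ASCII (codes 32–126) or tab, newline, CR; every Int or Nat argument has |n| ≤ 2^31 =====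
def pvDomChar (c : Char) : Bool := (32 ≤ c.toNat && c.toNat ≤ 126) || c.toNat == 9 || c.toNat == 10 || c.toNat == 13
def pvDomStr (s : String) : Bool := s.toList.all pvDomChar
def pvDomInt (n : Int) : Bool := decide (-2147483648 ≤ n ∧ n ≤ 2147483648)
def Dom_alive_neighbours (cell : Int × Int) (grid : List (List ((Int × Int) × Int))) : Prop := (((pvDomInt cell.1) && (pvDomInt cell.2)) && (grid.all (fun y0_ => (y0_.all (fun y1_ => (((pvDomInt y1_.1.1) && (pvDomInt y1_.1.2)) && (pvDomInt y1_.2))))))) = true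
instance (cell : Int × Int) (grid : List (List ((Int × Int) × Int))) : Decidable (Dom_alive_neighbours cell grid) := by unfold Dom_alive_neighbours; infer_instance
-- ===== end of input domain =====

-- B replaces A's six per-direction grid scans by an index built once
-- (coordinate -> alive count) and six dictionary lookups (objective: faster by a
-- constant factor; same return value).

-- ===== PORT A =====
-- A: for each of the 6 hex directions, scan the whole grid and count cells at that
-- neighbour coordinate whose state is 1.
def alive_neighbours (cell : Int × Int) (grid : List (List ((Int × Int) × Int))) : Int :=
  let directions : List (Int × Int) := [(1, 0), (1, -1), (0, -1), (-1, 0), (-1, 1), (0, 1)]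
  directions.foldl (fun count direction =>
    let coord : Int × Int := (cell.1 + direction.1, cell.2 + direction.2)
    grid.foldl (fun count row =>
      row.foldl (fun count center =>
        if center.1 = coord then (if center.2 = 1 then count + 1 else count) else count)
        count) count) 0

-- ===== PORT B =====
-- B: one pass over the grid building a dict coordinate -> alive count,
-- then sum six dictionary lookups, one per direction.
def alive_neighbours_alt (cell : Int × Int) (grid : List (List ((Int × Int) × Int))) : Int :=
  let alive : PySem.Dict (Int × Int) Int :=
    grid.foldl (fun d row =>
      row.foldl (fun d e =>
        if e.2 == 1 then d.modify e.1 0 (· + 1) else d) d) PySem.Dict.empty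
  let x := cell.1
  let y := cell.2
  (([(1, 0), (1, -1), (0, -1), (-1, 0), (-1, 1), (0, 1)] : List (Int × Int))).foldl
    (fun acc d => acc + alive.getD (x + d.1, y + d.2) 0) 0

-- ===== PRECONDITION & SPEC =====
def Spec_alive_neighbours (cell : Int × Int) (grid : List (List ((Int × Int) × Int))) (out : Int) : Prop := out = alive_neighbours_alt cell grid
instance (cell : Int × Int) (grid : List (List ((Int × Int) × Int))) (out : Int) : Decidable (Spec_alive_neighbours cell grid out) := by unfold Spec_alive_neighbours; infer_instance

-- ===== CLAIM =====
def Claim_equal_alive_neighbours : Prop := ∀ (cell : Int × Int) (grid : List (List ((Int × Int) × Int))), Dom_alive_neighbours cell grid → Spec_alive_neighbours cell grid (alive_neighbours cell grid)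

-- ===== LEMMAS AND PROOFS =====

-- inner row loop of A, for a fixed target coordinate
theorem rowA_eq (coord : Int × Int) (row : List ((Int × Int) × Int)) (c : Int) :
    row.foldl (fun count center =>
        if center.1 = coord then (if center.2 = 1 then count + 1 else count) else count) c
      = c + (row.countP (fun e => e.1 == coord && e.2 == 1) : Nat) := by
  induction row generalizing c with
  | nil => simp
  | cons e es ih =>
    simp only [List.foldl_cons, List.countP_cons, ih]
    by_cases h1 : e.1 = coord <;> by_cases h2 : e.2 = 1 <;>
      simp [h1, h2] <;> omega

-- grid loop of A for one direction counts over the flattened grid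
theorem gridA_eq (coord : Int × Int) (grid : List (List ((Int × Int) × Int))) (c : Int) :
    grid.foldl (fun count row =>
        row.foldl (fun count center =>
          if center.1 = coord then (if center.2 = 1 then count + 1 else count) else count)
          count) c
      = c + (grid.flatten.countP (fun e => e.1 == coord && e.2 == 1) : Nat) := by
  induction grid generalizing c with
  | nil => simp
  | cons r rs ih =>
    rw [List.foldl_cons, List.flatten_cons, List.countP_append, rowA_eq, ih]
    push_cast; ring

-- the dict built by B's counting fold over a flat list: lookup = alive count there
theorem buildFlat_getD (l : List ((Int × Int) × Int)) (d : PySem.Dict (Int × Int) Int)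
    (c : Int × Int) :
    (l.foldl (fun d e => if e.2 == 1 then d.modify e.1 0 (· + 1) else d) d).getD c 0
      = d.getD c 0 + (l.countP (fun e => e.1 == c && e.2 == 1) : Nat) := by
  induction l generalizing d with
  | nil => simp
  | cons e es ih =>
    simp only [List.foldl_cons, List.countP_cons, ih]
    by_cases h2 : e.2 = 1
    · by_cases h1 : e.1 = c
      · simp [h2, h1]; ring
      · simp [h2, h1, PySem.Dict.getD_modify, Ne.symm h1]
    · simp [h2]
-- B's nested build fold equals the flat build fold over the flattened grid
theorem buildNested_eq (grid : List (List ((Int × Int) × Int)))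
    (d : PySem.Dict (Int × Int) Int) :
    grid.foldl (fun d row =>
        row.foldl (fun d e => if e.2 == 1 then d.modify e.1 0 (· + 1) else d) d) d
      = grid.flatten.foldl (fun d e => if e.2 == 1 then d.modify e.1 0 (· + 1) else d) d := by
  induction grid generalizing d with
  | nil => simp
  | cons r rs ih => rw [List.foldl_cons, List.flatten_cons, List.foldl_append, ih]

-- ===== VERDICT =====
theorem alive_neighbours_spec : Claim_equal_alive_neighbours := by
  intro cell grid _
  show alive_neighbours cell grid = alive_neighbours_alt cell grid
  obtain ⟨a, b⟩ := cell
  simp only [alive_neighbours, alive_neighbours_alt, List.foldl_cons, List.foldl_nil,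
    gridA_eq, buildNested_eq, buildFlat_getD, PySem.Dict.getD_empty]
  ring
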